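-- pv_equiv track=rewrite | github.com/Sankalp4133/AI-powered-Current-Affairs-Extraction-System | hi.py | fix_broken_sentences
-- ===== SOURCE A (Python) =====
-- def fix_broken_sentences(ocr_text):
--     fixed_text = ""
--     paragraphs = ocr_text.split("\n\n")
--     for para in paragraphs:
--         lines = para.split("\n")
--         joined = ""
--         for line in lines:
--             line = line.strip()
--             if not line:
--                 continue
--             if joined and not joined.endswith((".", "!", "?", ":", ";")):
--                 joined += " " + line
--             else:
--                 joined += "\n" + line
--         fixed_text += joined.strip() + "\n\n"
--     return fixed_text
-- ===== SOURCE B (Python) =====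
-- PUNCT = ".!?:;"
--
-- def _groups(lines):
--     # split the line list into groups: a group ends at each line whose last char is punctuation
--     if not lines:
--         return []
--     for i, l in enumerate(lines):
--         if l[-1] in PUNCT:
--             return [lines[:i + 1]] + _groups(lines[i + 1:])
--     return [lines]
--
-- def fix_broken_sentences(ocr_text):
--     parts = []
--     for para in ocr_text.split("\n\n"):
--         stripped = [l.strip() for l in para.split("\n")]
--         lines = [l for l in stripped if l]
--         parts.append("\n".join(" ".join(g) for g in _groups(lines)))
--     return "".join(p + "\n\n" for p in parts)
-- ===== Notes on version B (the rewrite author's own statement) =====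
-- stated objective: alternative
-- what changed: A grows one accumulator string per paragraph, picking the space-or-newline separator by inspecting the accumulator's last character and stripping at the end; B instead strips and filters the lines up front, recursively splits them into sentence groups ending at punctuation, and renders each paragraph by joining each group with spaces and the groups with newlines.
import Mathlib
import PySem

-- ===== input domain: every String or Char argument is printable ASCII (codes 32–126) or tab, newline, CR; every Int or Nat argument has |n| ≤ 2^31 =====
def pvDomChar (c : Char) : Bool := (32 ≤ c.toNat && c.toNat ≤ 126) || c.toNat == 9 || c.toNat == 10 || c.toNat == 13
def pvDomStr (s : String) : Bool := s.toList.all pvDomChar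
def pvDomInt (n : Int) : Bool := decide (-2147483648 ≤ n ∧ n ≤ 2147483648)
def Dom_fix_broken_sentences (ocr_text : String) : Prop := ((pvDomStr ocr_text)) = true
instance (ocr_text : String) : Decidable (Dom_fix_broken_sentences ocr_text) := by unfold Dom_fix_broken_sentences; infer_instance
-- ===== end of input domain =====

-- B re-implements A by a different decomposition: A grows one accumulator string line by line, choosing
-- ' '/'\n' from the accumulator's last character and stripping the result; B first splits each paragraph's
-- stripped non-empty lines into groups ending at punctuation, then renders the groups with joins
-- (objective: alternative decomposition, same cost).

-- ===== PORT A =====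
-- both ports compute on List Char with the exact PySem.Chars primitives and pack the result with String.ofList
-- joined.endswith((".", "!", "?", ":", ";"))
def aEndsPunct (s : List Char) : Bool :=
  PySem.Chars.endswith s ['.'] || PySem.Chars.endswith s ['!'] || PySem.Chars.endswith s ['?'] ||
    PySem.Chars.endswith s [':'] || PySem.Chars.endswith s [';']

-- the inner 'for line in lines' loop of A building 'joined'
def aJoin (lines : List (List Char)) : List Char :=
  lines.foldl (fun joined line =>
    let l := PySem.Chars.strip line
    if l = [] then joined
    else if joined ≠ [] ∧ aEndsPunct joined = false then joined ++ ' ' :: l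
    else joined ++ '\n' :: l) []

def fix_broken_sentences (ocr_text : String) : String :=
  ((PySem.Chars.splitOn ocr_text.toList ['\n', '\n']).foldl (fun fixed para =>
    fixed ++ PySem.Chars.strip (aJoin (PySem.Chars.splitOn para ['\n'])) ++ ['\n', '\n']) []) |> String.ofList

-- ===== PORT B =====
-- l[-1] in ".!?:;"  (B only calls this on non-empty lines, where pyGet? is some)
def pEnd (l : List Char) : Bool :=
  match PySem.List.pyGet? l (-1) with
  | some c => ['.', '!', '?', ':', ';'].contains c
  | none => false

-- _groups: the enumerate loop finds the first line ending in punctuation and splits after it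
def altGroups (lines : List (List Char)) : List (List (List Char)) :=
  if lines.isEmpty then []
  else
    match h : lines.dropWhile (fun l => !pEnd l) with
    | [] => [lines]
    | x :: rest => (lines.takeWhile (fun l => !pEnd l) ++ [x]) :: altGroups rest
termination_by lines.length
decreasing_by
  have hle := List.length_dropWhile_le (fun l => !pEnd l) lines
  rw [h] at hle
  simp at hle ⊢
  omega

def fix_broken_sentences_alt (ocr_text : String) : String :=
  ((PySem.Chars.join []
    (((PySem.Chars.splitOn ocr_text.toList ['\n', '\n']).map (fun para =>
        PySem.Chars.join ['\n']
          ((altGroups (((PySem.Chars.splitOn para ['\n']).map PySem.Chars.strip).filter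
              (fun l => !l.isEmpty))).map (PySem.Chars.join [' '])))).map
      (· ++ ['\n', '\n'])))) |> String.ofList

-- ===== PRECONDITION & SPEC =====
def Spec_fix_broken_sentences (ocr_text : String) (out : String) : Prop := out = fix_broken_sentences_alt ocr_text
instance (ocr_text : String) (out : String) : Decidable (Spec_fix_broken_sentences ocr_text out) := by unfold Spec_fix_broken_sentences; infer_instance

-- ===== CLAIM (what is proved, stated in full; the proofs are below) =====
def Claim_equal_fix_broken_sentences : Prop := ∀ (ocr_text : String), Dom_fix_broken_sentences ocr_text → Spec_fix_broken_sentences ocr_text (fix_broken_sentences ocr_text)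

-- ===== LEMMAS AND PROOFS =====

def lastC (l : List Char) : Char := l.getLastD ' '
def pEndC (c : Char) : Bool := ['.', '!', '?', ':', ';'].contains c
def chain : Char → List (List Char) → List Char
  | _, [] => []
  | c, l :: rest => (if pEndC c then '\n' else ' ') :: (l ++ chain (lastC l) rest)
def gStep (joined l : List Char) : List Char :=
  if joined ≠ [] ∧ aEndsPunct joined = false then joined ++ ' ' :: l else joined ++ '\n' :: l

theorem endswith_singleton (s : List Char) (c : Char) :
    PySem.Chars.endswith s [c] = (s.getLast? == some c) := by
  rcases List.eq_nil_or_concat s with rfl | ⟨t, a, rfl⟩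
  · simp [PySem.Chars.endswith, List.isSuffixOf]
  · rw [Bool.eq_iff_iff, PySem.Chars.endswith_iff]
    simp
    constructor
    · intro h
      rcases h with ⟨u, hu⟩
      have := congrArg List.getLast? hu
      simp at this
      exact this.symm
    · rintro rfl; exact ⟨t, rfl⟩

theorem aEndsPunct_eq (s : List Char) (hs : s ≠ []) : aEndsPunct s = pEndC (lastC s) := by
  rcases List.eq_nil_or_concat s with rfl | ⟨t, a, rfl⟩
  · exact absurd rfl hs
  · simp [aEndsPunct, endswith_singleton, pEndC, lastC]
    by_cases h1 : a = '.' <;> by_cases h2 : a = '!' <;> by_cases h3 : a = '?' <;>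
      by_cases h4 : a = ':' <;> by_cases h5 : a = ';' <;> simp [h1, h2, h3, h4, h5]

theorem pEnd_eq (l : List Char) (hl : l ≠ []) : pEnd l = pEndC (lastC l) := by
  rcases List.eq_nil_or_concat l with rfl | ⟨t, a, rfl⟩
  · exact absurd rfl hl
  · simp [pEnd, pEndC, lastC, PySem.List.pyGet?, PySem.List.pyIdx?]

theorem lastC_append (j l : List Char) (hl : l ≠ []) : lastC (j ++ l) = lastC l := by
  rcases List.eq_nil_or_concat l with rfl | ⟨t, a, rfl⟩
  · exact absurd rfl hl
  · simp [lastC, List.getLastD_eq_getLast?, List.getLast?_append]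

theorem lastC_cons (c : Char) (l : List Char) (hl : l ≠ []) : lastC (c :: l) = lastC l := by
  simpa using lastC_append [c] l hl

theorem chain_ne (c : Char) (l : List Char) (rest : List (List Char)) :
    chain c (l :: rest) ≠ [] := by simp [chain]

theorem foldl_gStep_inv (fl : List (List Char)) (hne : ∀ l ∈ fl, l ≠ []) (j : List Char) (hj : j ≠ []) :
    fl.foldl gStep j = j ++ chain (lastC j) fl := by
  induction fl generalizing j with
  | nil => simp [chain]
  | cons l rest ih =>
    have hl : l ≠ [] := hne l (by simp)
    have hrest : ∀ x ∈ rest, x ≠ [] := fun x hx => hne x (by simp [hx])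
    have hstep : gStep j l = j ++ (if pEndC (lastC j) then '\n' else ' ') :: l := by
      by_cases hp : pEndC (lastC j) = true <;>
        simp [gStep, aEndsPunct_eq j hj, hp, hj]
    have hlast : lastC (j ++ (if pEndC (lastC j) then '\n' else ' ') :: l) = lastC l := by
      rw [lastC_append _ _ (by simp), lastC_cons _ _ hl]
    calc (l :: rest).foldl gStep j = rest.foldl gStep (gStep j l) := rfl
      _ = (j ++ (if pEndC (lastC j) then '\n' else ' ') :: l) ++ chain (lastC l) rest := by
          rw [hstep, ih hrest _ (by simp), hlast]
      _ = j ++ chain (lastC j) (l :: rest) := by simp [chain]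

theorem foldl_gStep_chain (fl : List (List Char)) (hne : ∀ l ∈ fl, l ≠ []) :
    fl.foldl gStep [] = chain '.' fl := by
  cases fl with
  | nil => rfl
  | cons l rest =>
    have hl : l ≠ [] := hne l (by simp)
    have hrest : ∀ x ∈ rest, x ≠ [] := fun x hx => hne x (by simp [hx])
    have h0 : gStep [] l = '\n' :: l := by simp [gStep]
    calc (l :: rest).foldl gStep [] = rest.foldl gStep ('\n' :: l) := by rw [List.foldl_cons, h0]
      _ = ('\n' :: l) ++ chain (lastC ('\n' :: l)) rest := foldl_gStep_inv rest hrest _ (by simp)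
      _ = chain '.' (l :: rest) := by rw [lastC_cons _ _ hl]; simp [chain, pEndC]

theorem join_cons (sep : List Char) (x : List Char) (xs : List (List Char)) :
    PySem.Chars.join sep (x :: xs) = x ++ xs.flatMap (fun y => sep ++ y) := by
  induction xs generalizing x with
  | nil => simp [PySem.Chars.join, List.intercalate]
  | cons y ys ih =>
    have : PySem.Chars.join sep (x :: y :: ys) = x ++ sep ++ PySem.Chars.join sep (y :: ys) := by
      simp [PySem.Chars.join, List.intercalate]
    rw [this, ih]
    simp

theorem chain_mid (pre : List (List Char)) (c : Char) (hc : pEndC c = false)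
    (hpre : ∀ l ∈ pre, l ≠ [] ∧ pEndC (lastC l) = false) (x : List Char) (rest : List (List Char)) :
    chain c (pre ++ x :: rest) = pre.flatMap (fun l => ' ' :: l) ++ ' ' :: (x ++ chain (lastC x) rest) := by
  induction pre generalizing c with
  | nil => simp [chain, hc]
  | cons p pre' ih =>
    have hp := hpre p (by simp)
    rw [List.cons_append]
    show chain c (p :: (pre' ++ x :: rest)) = _
    rw [show chain c (p :: (pre' ++ x :: rest)) =
      (if pEndC c then '\n' else ' ') :: (p ++ chain (lastC p) (pre' ++ x :: rest)) from rfl]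
    rw [ih (lastC p) hp.2 (fun l hl => hpre l (by simp [hl])), hc]
    simp

theorem chain_lead (pre : List (List Char)) (c : Char) (hc : pEndC c = true)
    (hpre : ∀ l ∈ pre, l ≠ [] ∧ pEndC (lastC l) = false) (x : List Char) (rest : List (List Char)) :
    chain c (pre ++ x :: rest) =
      '\n' :: (PySem.Chars.join [' '] (pre ++ [x]) ++ chain (lastC x) rest) := by
  cases pre with
  | nil => simp [chain, hc, join_cons]
  | cons p pre' =>
    have hp := hpre p (by simp)
    rw [List.cons_append]
    rw [show chain c (p :: (pre' ++ x :: rest)) =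
      (if pEndC c then '\n' else ' ') :: (p ++ chain (lastC p) (pre' ++ x :: rest)) from rfl]
    rw [chain_mid pre' (lastC p) hp.2 (fun l hl => hpre l (by simp [hl])) x rest, hc]
    simp [join_cons]

theorem flatMap_sep (sep : List Char) (as : List (List Char)) (ha : as ≠ []) :
    as.flatMap (fun y => sep ++ y) = sep ++ PySem.Chars.join sep as := by
  cases as with
  | nil => exact absurd rfl ha
  | cons x xs => rw [join_cons]; simp

theorem altGroups_ne_nil (lines : List (List Char)) (h : lines ≠ []) : altGroups lines ≠ [] := by
  unfold altGroups
  simp [h]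
  split <;> simp

theorem chain_space (fl : List (List Char)) (c : Char) (hc : pEndC c = false)
    (hfl : ∀ l ∈ fl, l ≠ [] ∧ pEndC (lastC l) = false) :
    chain c fl = fl.flatMap (fun l => ' ' :: l) := by
  induction fl generalizing c with
  | nil => rfl
  | cons l rest ih =>
    have hl := hfl l (by simp)
    rw [show chain c (l :: rest) = (if pEndC c then '\n' else ' ') :: (l ++ chain (lastC l) rest) from rfl]
    rw [ih (lastC l) hl.2 (fun y hy => hfl y (by simp [hy])), hc]
    simp

theorem chain_eq_render (fl : List (List Char)) :
    (∀ l ∈ fl, l ≠ []) → fl ≠ [] → ∀ c : Char, pEndC c = true →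
      chain c fl = '\n' :: PySem.Chars.join ['\n'] ((altGroups fl).map (PySem.Chars.join [' '])) := by
  induction fl using altGroups.induct with
  | case1 lines hempty =>
    intro _ hfl
    simp at hempty
    exact absurd hempty hfl
  | case2 lines hempty hdrop =>
    intro hne hfl c hc
    rcases List.exists_cons_of_ne_nil hfl with ⟨l, rest', rfl⟩
    have hok : ∀ y ∈ l :: rest', y ≠ [] ∧ pEndC (lastC y) = false := by
      intro y hy
      refine ⟨hne y hy, ?_⟩
      rw [← pEnd_eq y (hne y hy)]
      have := List.dropWhile_eq_nil_iff.mp hdrop y hy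
      simpa using this
    have hAG : altGroups (l :: rest') = [l :: rest'] := by
      rw [altGroups]
      simp only [List.isEmpty_cons, Bool.false_eq_true, if_false]
      split
      · rfl
      · rename_i x rest h
        rw [hdrop] at h
        cases h
    have hcs := chain_space rest' (lastC l) (hok l (by simp)).2 (fun y hy => hok y (by simp [hy]))
    rw [hAG]
    rw [show chain c (l :: rest') = (if pEndC c then '\n' else ' ') :: (l ++ chain (lastC l) rest') from rfl]
    simp [hc, hcs, join_cons]
  | case3 lines hempty x rest hdrop ih =>
    intro hne hfl c hc
    have hlines : lines.takeWhile (fun l => !pEnd l) ++ x :: rest = lines := by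
      rw [← hdrop]; exact List.takeWhile_append_dropWhile
    have hsub : ∀ y ∈ lines.takeWhile (fun l => !pEnd l) ++ x :: rest, y ∈ lines := by
      rw [hlines]; exact fun y hy => hy
    have hpre : ∀ l ∈ lines.takeWhile (fun l => !pEnd l), l ≠ [] ∧ pEndC (lastC l) = false := by
      intro l hl
      have hlne : l ≠ [] := hne l (hsub l (by simp [hl]))
      refine ⟨hlne, ?_⟩
      rw [← pEnd_eq l hlne]
      have := List.mem_takeWhile_imp hl
      simpa using this
    have hx : x ≠ [] := hne x (hsub x (by simp))
    have hpx : pEnd x = true := by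
      have := List.head?_dropWhile_not (fun l => !pEnd l) lines
      rw [hdrop] at this
      simpa using this
    have hAG : altGroups lines = (lines.takeWhile (fun l => !pEnd l) ++ [x]) :: altGroups rest := by
      rw [altGroups]
      simp only [hempty, Bool.false_eq_true, if_false]
      split
      · rename_i h
        rw [hdrop] at h
        cases h
      · rename_i x' rest' h
        rw [hdrop] at h
        cases h
        rfl
    have hchain := chain_lead (lines.takeWhile (fun l => !pEnd l)) c hc hpre x rest
    rw [hlines] at hchain
    rw [hchain, hAG]
    cases hr : rest with
    | nil =>
      rw [show altGroups [] = [] from by rw [altGroups]; rfl]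
      simp [chain, join_cons]
    | cons r rest' =>
      have hrest : ∀ l ∈ rest, l ≠ [] := by
        intro l hl
        exact hne l (hsub l (by simp [hl]))
      have hrec := ih hrest (by rw [hr]; simp) (lastC x) (by rw [← pEnd_eq x hx]; exact hpx)
      have hAGne := altGroups_ne_nil rest (by rw [hr]; simp)
      have hfm := flatMap_sep ['\n'] ((altGroups rest).map (PySem.Chars.join [' '])) (by simpa using hAGne)
      rw [← hr, hrec, List.map_cons,
        join_cons ['\n'] (PySem.Chars.join [' '] (lines.takeWhile (fun l => !pEnd l) ++ [x])), hfm]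
      simp

theorem dropWhile_isspace_eq_self (r : List Char)
    (hh : ∀ c, r.head? = some c → PySem.Chars.isspace c = false) :
    List.dropWhile PySem.Chars.isspace r = r := by
  cases r with
  | nil => rfl
  | cons a t => exact List.dropWhile_cons_of_neg (by simp [hh a rfl])

theorem rstrip_eq_self (r : List Char)
    (hl : ∀ c, r.getLast? = some c → PySem.Chars.isspace c = false) :
    PySem.Chars.rstrip r = r := by
  rw [PySem.Chars.rstrip, dropWhile_isspace_eq_self r.reverse
    (fun c hc => hl c (by rwa [List.head?_reverse] at hc)), List.reverse_reverse]

theorem strip_of_ends (r : List Char)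
    (hh : ∀ c, r.head? = some c → PySem.Chars.isspace c = false)
    (hl : ∀ c, r.getLast? = some c → PySem.Chars.isspace c = false) :
    PySem.Chars.strip r = r := by
  rw [PySem.Chars.strip, PySem.Chars.lstrip, dropWhile_isspace_eq_self r hh, rstrip_eq_self r hl]

theorem strip_sandwich (c0 : Char) (h0 : PySem.Chars.isspace c0 = true) (r : List Char)
    (hh : ∀ c, r.head? = some c → PySem.Chars.isspace c = false)
    (hl : ∀ c, r.getLast? = some c → PySem.Chars.isspace c = false) :
    PySem.Chars.strip (c0 :: r) = r := by
  rw [PySem.Chars.strip, PySem.Chars.lstrip, List.dropWhile_cons_of_pos (by simp [h0]),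
    dropWhile_isspace_eq_self r hh, rstrip_eq_self r hl]

theorem strip_head? (x : List Char) (c : Char) (h : (PySem.Chars.strip x).head? = some c) :
    PySem.Chars.isspace c = false := by
  rw [PySem.Chars.strip, PySem.Chars.rstrip] at h
  -- strip x is a reversed suffix-drop: its head is a head of (lstrip x)
  rcases List.dropWhile_suffix (l := (PySem.Chars.lstrip x).reverse) PySem.Chars.isspace with ⟨t, ht⟩
  have hpre : (List.dropWhile PySem.Chars.isspace (PySem.Chars.lstrip x).reverse).reverse.head? = some c := h
  have : (PySem.Chars.lstrip x).head? = some c := by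
    have := congrArg List.reverse ht
    rw [List.reverse_append, List.reverse_reverse] at this
    rw [← this]
    cases hd : (List.dropWhile PySem.Chars.isspace (PySem.Chars.lstrip x).reverse).reverse with
    | nil => rw [hd] at hpre; cases hpre
    | cons a s => rw [hd] at hpre; simp at hpre; simp [hpre]
  have hdw := List.head?_dropWhile_not PySem.Chars.isspace x
  rw [PySem.Chars.lstrip] at this
  rw [this] at hdw
  exact hdw

theorem strip_last? (x : List Char) (c : Char) (h : (PySem.Chars.strip x).getLast? = some c) :
    PySem.Chars.isspace c = false := by
  rw [PySem.Chars.strip, PySem.Chars.rstrip, List.getLast?_reverse] at h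
  have hdw := List.head?_dropWhile_not PySem.Chars.isspace (PySem.Chars.lstrip x).reverse
  rw [h] at hdw
  exact hdw

theorem strip_idem (x : List Char) :
    PySem.Chars.strip (PySem.Chars.strip x) = PySem.Chars.strip x :=
  strip_of_ends _ (strip_head? x) (strip_last? x)

theorem chain_getLast (fl : List (List Char)) :
    (∀ l ∈ fl, l ≠ []) → fl ≠ [] → ∀ c : Char,
      ∃ l ∈ fl, (chain c fl).getLast? = l.getLast? := by
  induction fl with
  | nil => intro _ h; exact absurd rfl h
  | cons l rest ih =>
    intro hne _ c
    have hl : l ≠ [] := hne l (by simp)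
    by_cases hr : rest = []
    · subst hr
      refine ⟨l, by simp, ?_⟩
      rw [show chain c [l] = (if pEndC c then '\n' else ' ') :: (l ++ chain (lastC l) []) from rfl]
      rw [show chain (lastC l) [] = [] from rfl]
      rw [show ((if pEndC c then '\n' else ' ') :: (l ++ [])) = [(if pEndC c then '\n' else ' ')] ++ l from by simp]
      rw [List.getLast?_append]
      cases hgl : l.getLast? with
      | none => exact absurd (List.getLast?_eq_none_iff.mp hgl) hl
      | some a => simp
    · have hrest : ∀ y ∈ rest, y ≠ [] := fun y hy => hne y (by simp [hy])
      rcases ih hrest hr (lastC l) with ⟨w, hw, hweq⟩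
      refine ⟨w, by simp [hw], ?_⟩
      rw [show chain c (l :: rest) = (if pEndC c then '\n' else ' ') :: (l ++ chain (lastC l) rest) from rfl]
      rw [show ((if pEndC c then '\n' else ' ') :: (l ++ chain (lastC l) rest))
          = ([(if pEndC c then '\n' else ' ')] ++ l) ++ chain (lastC l) rest from by simp]
      rw [List.getLast?_append]
      have hcne : chain (lastC l) rest ≠ [] := by
        rcases List.exists_cons_of_ne_nil hr with ⟨y, ys, hys⟩
        rw [hys]; exact chain_ne _ _ _
      cases hgl : (chain (lastC l) rest).getLast? with
      | none => exact absurd (List.getLast?_eq_none_iff.mp hgl) hcne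
      | some a => rw [hgl] at hweq; simp [hweq.symm]

theorem strip_chain (fl : List (List Char))
    (hok : ∀ l ∈ fl, l ≠ [] ∧ PySem.Chars.strip l = l) :
    PySem.Chars.strip (chain '.' fl) =
      PySem.Chars.join ['\n'] ((altGroups fl).map (PySem.Chars.join [' '])) := by
  cases hfl : fl with
  | nil =>
    rw [show altGroups ([] : List (List Char)) = [] from by rw [altGroups]; rfl]
    rfl
  | cons l rest =>
    rw [← hfl]
    have hne : ∀ l ∈ fl, l ≠ [] := fun l hl => (hok l hl).1
    have hrender := chain_eq_render fl hne (by rw [hfl]; simp) '.' (by decide)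
    have hl : l ≠ [] := (hok l (by rw [hfl]; simp)).1
    have hchain : chain '.' fl = '\n' :: (l ++ chain (lastC l) rest) := by
      rw [hfl]; rfl
    have hr : l ++ chain (lastC l) rest
        = PySem.Chars.join ['\n'] ((altGroups fl).map (PySem.Chars.join [' '])) := by
      have := hchain.symm.trans hrender
      exact List.cons.injEq .. |>.mp this |>.2
    rw [hchain, strip_sandwich '\n' (by decide) _ ?_ ?_, hr]
    · -- head of l ++ … is head of l, non-space since l is stripped
      intro c hc
      rw [List.head?_append_of_ne_nil _ hl] at hc
      rw [← (hok l (by rw [hfl]; simp)).2] at hc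
      exact strip_head? l c hc
    · -- last of the chain is the last of some stripped line
      intro c hc
      rcases chain_getLast fl hne (by rw [hfl]; simp) '.' with ⟨w, hw, hweq⟩
      rw [hchain, show ('\n' :: (l ++ chain (lastC l) rest))
          = ['\n'] ++ (l ++ chain (lastC l) rest) from rfl,
        List.getLast?_append, hc] at hweq
      simp at hweq
      rw [← (hok w hw).2] at hweq
      exact strip_last? w c hweq.symm

theorem foldl_strip_filter (lines : List (List Char)) (j : List Char) :
    lines.foldl (fun joined line =>
      let l := PySem.Chars.strip line
      if l = [] then joined
      else if joined ≠ [] ∧ aEndsPunct joined = false then joined ++ ' ' :: l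
      else joined ++ '\n' :: l) j
    = ((lines.map PySem.Chars.strip).filter (fun l => !l.isEmpty)).foldl gStep j := by
  induction lines generalizing j with
  | nil => rfl
  | cons hd tl ih =>
    simp only [List.foldl_cons, List.map_cons, List.filter_cons]
    by_cases h : PySem.Chars.strip hd = []
    · simp [h, ih]
    · simp only [h, List.isEmpty_eq_false_iff.mpr h]
      simp [gStep, h, ih]

theorem per_para (lines : List (List Char)) :
    PySem.Chars.strip (aJoin lines) =
      PySem.Chars.join ['\n']
        ((altGroups ((lines.map PySem.Chars.strip).filter (fun l => !l.isEmpty))).map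
          (PySem.Chars.join [' '])) := by
  have h1 : aJoin lines
      = ((lines.map PySem.Chars.strip).filter (fun l => !l.isEmpty)).foldl gStep [] :=
    foldl_strip_filter lines []
  have hok : ∀ l ∈ (lines.map PySem.Chars.strip).filter (fun l => !l.isEmpty),
      l ≠ [] ∧ PySem.Chars.strip l = l := by
    intro l hl
    rcases List.mem_filter.mp hl with ⟨hmem, hne⟩
    rcases List.mem_map.mp hmem with ⟨y, _, rfl⟩
    exact ⟨by simpa using hne, strip_idem y⟩
  rw [h1, foldl_gStep_chain _ (fun l hl => (hok l hl).1), strip_chain _ hok]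

theorem join_nil_flatten (as : List (List Char)) : PySem.Chars.join [] as = as.flatten := by
  cases as with
  | nil => rfl
  | cons x xs => rw [join_cons]; simp

theorem main_eq (ocr_text : String) : fix_broken_sentences ocr_text = fix_broken_sentences_alt ocr_text := by
  unfold fix_broken_sentences fix_broken_sentences_alt
  apply congrArg String.ofList
  rw [show (fun (fixed para : List Char) =>
      fixed ++ PySem.Chars.strip (aJoin (PySem.Chars.splitOn para ['\n'])) ++ ['\n', '\n'])
    = (fun fixed para =>
      fixed ++ (PySem.Chars.strip (aJoin (PySem.Chars.splitOn para ['\n'])) ++ ['\n', '\n'])) from by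
      funext a b; simp]
  rw [PySem.List.foldl_append_eq_flatMap, join_nil_flatten, List.map_map, ← List.flatMap_def]
  simp only [per_para]
  rfl

-- ===== VERDICT (by name: the statement is the Claim_ definition above) =====
theorem fix_broken_sentences_spec : Claim_equal_fix_broken_sentences := by
  intro ocr_text _
  unfold Spec_fix_broken_sentences
  exact main_eq ocr_text
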